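-- pv_equiv track=rewrite | github.com/foniafonia/araia | app.py | filter_records_by_letter
-- ===== SOURCE A (Python) =====
-- def filter_records_by_letter(records: list[dict], letter: str, search_mode: str) -> list[dict]:
--     """Aplica el filtro alfabético usando el modo de búsqueda seleccionado."""
--     if not letter:
--         return records
--     needle = letter.lower()
--     filtered = []
--     for record in records:
--         word = str(record.get("palabra", "")).lower()
--         if search_mode == "starts_with" and word.startswith(needle):
--             filtered.append(record)
--         elif search_mode == "ends_with" and word.endswith(needle):
--             filtered.append(record)
--         elif search_mode == "exact" and word == needle:
--             filtered.append(record)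
--         elif search_mode == "contains" and needle in word:
--             filtered.append(record)
--     return filtered
-- ===== SOURCE B (Python) =====
-- def filter_records_by_letter(records: list[dict], letter: str, search_mode: str) -> list[dict]:
--     """Aplica el filtro alfabético usando el modo de búsqueda seleccionado."""
--     if not letter:
--         return records
--     # Reduce every mode to ONE substring test by framing the word with a
--     # sentinel that cannot occur in the data: prefix/suffix/equality tests
--     # become occurrences of a sentinel-anchored pattern inside NUL+word+NUL.
--     sep = "\x00"
--     needle = letter.lower()
--     if search_mode == "starts_with":
--         pattern = sep + needle
--     elif search_mode == "ends_with":
--         pattern = needle + sep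
--     elif search_mode == "exact":
--         pattern = sep + needle + sep
--     elif search_mode == "contains":
--         pattern = needle
--     else:
--         return []
--     out = []
--     for record in records:
--         word = str(record.get("palabra", "")).lower()
--         if pattern in sep + word + sep:
--             out.append(record)
--     return out
-- ===== Notes on version B (the rewrite author's own statement) =====
-- stated objective: alternative
-- what changed: Replaces the per-record four-way mode cascade with a sentinel-framing reduction: the mode is compiled once into a single NUL-anchored pattern (NUL+needle for starts_with, needle+NUL for ends_with, NUL+needle+NUL for exact, needle for contains) and every record is kept iff that pattern occurs in NUL+word+NUL, so the loop performs one uniform substring search instead of prefix/suffix/equality/containment tests.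
import Mathlib
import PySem

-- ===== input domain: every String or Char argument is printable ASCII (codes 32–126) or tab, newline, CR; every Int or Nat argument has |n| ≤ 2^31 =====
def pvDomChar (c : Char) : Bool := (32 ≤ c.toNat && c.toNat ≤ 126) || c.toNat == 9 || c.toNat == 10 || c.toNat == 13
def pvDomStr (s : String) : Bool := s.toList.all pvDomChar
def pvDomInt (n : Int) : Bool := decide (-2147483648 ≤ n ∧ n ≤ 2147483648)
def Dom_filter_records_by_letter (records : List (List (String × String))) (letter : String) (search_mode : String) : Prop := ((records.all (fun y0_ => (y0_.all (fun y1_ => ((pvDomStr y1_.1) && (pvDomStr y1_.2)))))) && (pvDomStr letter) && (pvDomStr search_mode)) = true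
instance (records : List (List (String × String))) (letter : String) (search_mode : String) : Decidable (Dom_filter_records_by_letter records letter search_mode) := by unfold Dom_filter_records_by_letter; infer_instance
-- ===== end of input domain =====

-- B compiles the search mode once into a single NUL-anchored pattern and keeps a record iff
-- that pattern occurs in NUL+word+NUL (one uniform substring search per record); objective: alternative.


-- ===== PORT A =====
def filter_records_by_letter (records : List (List (String × String))) (letter : String) (search_mode : String) : List (List (String × String)) :=
  if PySem.Str.len letter == 0 then records
  else
    let needle := PySem.Str.lower letter
    records.foldl (fun filtered record =>
      let word := PySem.Str.lower ((PySem.Dict.mk record).getD "palabra" "")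
      if search_mode == "starts_with" && PySem.Str.startswith word needle then filtered ++ [record]
      else if search_mode == "ends_with" && PySem.Str.endswith word needle then filtered ++ [record]
      else if search_mode == "exact" && word == needle then filtered ++ [record]
      else if search_mode == "contains" && PySem.Str.isIn needle word then filtered ++ [record]
      else filtered) []

-- ===== PORT B =====
-- Source B's string concatenations and the 'pattern in …' test are ported on code-point lists
-- (PySem.Chars level, where PySem string functions are defined) — exact for Python str.
def filter_records_by_letter_alt (records : List (List (String × String))) (letter : String) (search_mode : String) : List (List (String × String)) :=
  if PySem.Str.len letter == 0 then records
  else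
    let sep : List Char := [Char.ofNat 0]
    let needle := PySem.Chars.lower letter.toList
    let pattern? : Option (List Char) :=
      if search_mode == "starts_with" then some (sep ++ needle)
      else if search_mode == "ends_with" then some (needle ++ sep)
      else if search_mode == "exact" then some (sep ++ needle ++ sep)
      else if search_mode == "contains" then some needle
      else none
    match pattern? with
    | none => []
    | some pattern =>
      records.foldl (fun out record =>
        let word := PySem.Chars.lower ((PySem.Dict.mk record).getD "palabra" "").toList
        if PySem.Chars.isIn pattern (sep ++ word ++ sep) then out ++ [record] else out) []

-- ===== PRECONDITION & SPEC =====
def Spec_filter_records_by_letter (records : List (List (String × String))) (letter : String) (search_mode : String) (out : List (List (String × String))) : Prop := out = filter_records_by_letter_alt records letter search_mode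
instance (records : List (List (String × String))) (letter : String) (search_mode : String) (out : List (List (String × String))) : Decidable (Spec_filter_records_by_letter records letter search_mode out) := by unfold Spec_filter_records_by_letter; infer_instance

-- ===== CLAIM (what is proved, stated in full; the proofs are below) =====
def Claim_equal_filter_records_by_letter : Prop := ∀ (records : List (List (String × String))) (letter : String) (search_mode : String), Dom_filter_records_by_letter records letter search_mode → Spec_filter_records_by_letter records letter search_mode (filter_records_by_letter records letter search_mode)

-- ===== LEMMAS AND PROOFS =====

-- The sentinel char of B's framing never occurs in lowered Dom-strings.
theorem pv_lowerChar_ne_sep (c : Char) (h : pvDomChar c = true) :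
    PySem.Chars.lowerChar c ≠ Char.ofNat 0 := by
  have hc : 9 ≤ c.toNat ∧ c.toNat ≤ 126 := by
    simp [pvDomChar] at h
    omega
  have h0 : (Char.ofNat 0).toNat = 0 := by decide
  unfold PySem.Chars.lowerChar
  split_ifs with hu
  · intro he
    have ht := congrArg Char.toNat he
    have hv : (c.toNat + 32).isValidChar := Or.inl (by omega)
    rw [Char.toNat_ofNat, if_pos hv, h0] at ht
    omega
  · intro he
    have ht := congrArg Char.toNat he
    rw [h0] at ht
    omega

theorem pv_sep_not_mem_lower (cs : List Char) (h : cs.all pvDomChar = true) :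
    (Char.ofNat 0) ∉ PySem.Chars.lower cs := by
  unfold PySem.Chars.lower
  intro hm
  rcases List.mem_map.mp hm with ⟨c, hc, he⟩
  exact pv_lowerChar_ne_sep c (by simpa using (List.all_eq_true.mp h c hc)) he

-- A value looked up in a Dom-record (default "") is a Dom-string.
theorem pv_getD_dom (l : List (String × String)) (k : String)
    (h : l.all (fun p => pvDomStr p.1 && pvDomStr p.2) = true) :
    pvDomStr ((PySem.Dict.mk l).getD k "") = true := by
  induction l with
  | nil => rfl
  | cons p rest ih =>
    rw [PySem.Dict.getD_eq_get?_getD, PySem.Dict.get?_mk_cons]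
    simp only [List.all_cons, Bool.and_eq_true] at h
    split_ifs with he
    · exact h.1.2
    · rw [← PySem.Dict.getD_eq_get?_getD]
      exact ih h.2

-- Core framing facts, stated in the shapes B's port produces ([z]++n, ([z]++w)++[z]).

theorem pv_prefix_drop (z : Char) (n w : List Char) (hn : z ∉ n) (hw : z ∉ w) (j : ℕ)
    (h : (z :: n) <+: (z :: (w ++ [z])).drop j) : n <+: w := by
  cases j with
  | zero =>
    rw [List.drop_zero, List.cons_prefix_cons] at h
    rcases List.prefix_concat_iff.mp h.2 with he | hp
    · exact absurd (by simp [he]) hn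
    · exact hp
  | succ i =>
    simp only [List.drop_succ_cons] at h
    by_cases hi : i ≤ w.length
    · rw [List.drop_append_of_le_length hi] at h
      rcases List.prefix_concat_iff.mp h with he | hp
      · cases hwd : w.drop i with
        | nil =>
          rw [hwd] at he
          simp only [List.nil_append, List.cons.injEq] at he
          rw [he.2]
          exact List.nil_prefix
        | cons a t =>
          rw [hwd] at he
          have : z = a := by simpa using congrArg (fun l => l.headI) he
          have : z ∈ w := List.mem_of_mem_drop (by rw [hwd, this]; exact List.mem_cons_self)
          exact absurd this hw
      · have : z ∈ w.drop i := hp.subset List.mem_cons_self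
        exact absurd (List.mem_of_mem_drop this) hw
    · have : (w ++ [z]).drop i = [] := by
        apply List.drop_eq_nil_of_le
        simp
        omega
      rw [this] at h
      exact absurd h.length_le (by simp)

theorem pv_prefix_frame (z : Char) (n w : List Char) (hn : z ∉ n) (hw : z ∉ w) :
    PySem.Chars.isIn ([z] ++ n) (([z] ++ w) ++ [z]) = PySem.Chars.startswith w n := by
  rw [Bool.eq_iff_iff, PySem.Chars.isIn_iff_infix, PySem.Chars.startswith_iff]
  constructor
  · intro hinf
    have hin : PySem.Chars.isIn ([z] ++ n) (([z] ++ w) ++ [z]) = true :=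
      (PySem.Chars.isIn_iff_infix _ _).mpr hinf
    rcases (PySem.Chars.exists_prefix_drop_iff_isIn _ _).mpr hin with ⟨j, hj⟩
    exact pv_prefix_drop z n w hn hw j (by simpa using hj)
  · rintro ⟨r, rfl⟩
    exact ⟨[], r ++ [z], by simp⟩

theorem pv_suffix_frame (z : Char) (n w : List Char) (hn : z ∉ n) (hw : z ∉ w) :
    PySem.Chars.isIn (n ++ [z]) (([z] ++ w) ++ [z]) = PySem.Chars.endswith w n := by
  rw [Bool.eq_iff_iff, PySem.Chars.isIn_iff_infix, PySem.Chars.endswith_iff,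
    ← List.reverse_infix, ← List.reverse_prefix]
  have e1 : (n ++ [z]).reverse = [z] ++ n.reverse := by simp
  have e2 : ((([z] ++ w) ++ [z]).reverse) = ([z] ++ w.reverse) ++ [z] := by simp
  rw [e1, e2, ← PySem.Chars.isIn_iff_infix, ← PySem.Chars.startswith_iff,
    pv_prefix_frame z n.reverse w.reverse (by simpa using hn) (by simpa using hw)]

theorem pv_exact_frame (z : Char) (n w : List Char) (_hn : z ∉ n) (hw : z ∉ w) :
    PySem.Chars.isIn ([z] ++ n ++ [z]) (([z] ++ w) ++ [z]) = (n == w) := by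
  rw [Bool.eq_iff_iff, PySem.Chars.isIn_iff_infix, beq_iff_eq]
  constructor
  · intro hinf
    have hin := (PySem.Chars.isIn_iff_infix _ _).mpr hinf
    rcases (PySem.Chars.exists_prefix_drop_iff_isIn _ _).mpr hin with ⟨j, hj⟩
    have hj : (z :: (n ++ [z])) <+: (z :: (w ++ [z])).drop j := by simpa using hj
    cases j with
    | zero =>
      rw [List.drop_zero, List.cons_prefix_cons] at hj
      rcases List.prefix_concat_iff.mp hj.2 with he | hp
      · exact (List.append_left_inj [z]).mp he
      · have : z ∈ w := hp.subset (by simp)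
        exact absurd this hw
    | succ i =>
      exfalso
      simp only [List.drop_succ_cons] at hj
      by_cases hi : i ≤ w.length
      · rw [List.drop_append_of_le_length hi] at hj
        rcases List.prefix_concat_iff.mp hj with he | hp
        · cases hwd : w.drop i with
          | nil =>
            rw [hwd] at he
            simp at he
          | cons a t =>
            rw [hwd] at he
            have : z = a := by simpa using congrArg (fun l => l.headI) he
            exact absurd (List.mem_of_mem_drop (by rw [hwd, this]; exact List.mem_cons_self)) hw
        · exact absurd (List.mem_of_mem_drop (hp.subset List.mem_cons_self)) hw
      · have : (w ++ [z]).drop i = [] := by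
          apply List.drop_eq_nil_of_le
          simp
          omega
        rw [this] at hj
        exact absurd hj.length_le (by simp)
  · rintro rfl
    exact ⟨[], [], by simp⟩

theorem pv_contains_frame (z : Char) (n w : List Char) (hn : z ∉ n) (_hw : z ∉ w) :
    PySem.Chars.isIn n (([z] ++ w) ++ [z]) = PySem.Chars.isIn n w := by
  rw [Bool.eq_iff_iff, PySem.Chars.isIn_iff_infix, PySem.Chars.isIn_iff_infix]
  constructor
  · intro hinf
    have hin := (PySem.Chars.isIn_iff_infix _ _).mpr hinf
    rcases (PySem.Chars.exists_prefix_drop_iff_isIn _ _).mpr hin with ⟨j, hj⟩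
    have hj : n <+: (z :: (w ++ [z])).drop j := by simpa using hj
    cases j with
    | zero =>
      cases n with
      | nil => exact ⟨[], w, by simp⟩
      | cons a t =>
        rw [List.drop_zero, List.cons_prefix_cons] at hj
        have : z ∈ a :: t := by rw [← hj.1]; exact List.mem_cons_self
        exact absurd this hn
    | succ i =>
      simp only [List.drop_succ_cons] at hj
      by_cases hi : i ≤ w.length
      · rw [List.drop_append_of_le_length hi] at hj
        rcases List.prefix_concat_iff.mp hj with he | hp
        · exact absurd (by simp [he]) hn
        · exact List.infix_iff_prefix_suffix.mpr ⟨w.drop i, hp, List.drop_suffix i w⟩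
      · have : (w ++ [z]).drop i = [] := by
          apply List.drop_eq_nil_of_le
          simp
          omega
        rw [this] at hj
        rw [List.prefix_nil.mp hj]
        exact ⟨[], w, by simp⟩
  · intro hinf
    exact hinf.trans ⟨[z], [z], by simp⟩

-- A fold over a function that ignores its element returns its initial accumulator.
theorem pv_foldl_id {α β : Type} (l : List α) (init : β) :
    List.foldl (fun acc (_ : α) => acc) init l = init := by
  induction l generalizing init with
  | nil => rfl
  | cons x xs ih => exact ih init

-- ===== VERDICT (by name: the statement is the Claim_ definition above) =====
theorem filter_records_by_letter_spec : Claim_equal_filter_records_by_letter := by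
  intro records letter search_mode hdom
  unfold Dom_filter_records_by_letter at hdom
  simp only [Bool.and_eq_true] at hdom
  obtain ⟨⟨hrecs, hlet⟩, -⟩ := hdom
  unfold Spec_filter_records_by_letter filter_records_by_letter filter_records_by_letter_alt
  by_cases hc : (PySem.Str.len letter == 0) = true
  · simp only [hc, if_true]
  · simp only [Bool.not_eq_true] at hc
    simp only [hc, Bool.false_eq_true, if_false]
    have hN : Char.ofNat 0 ∉ PySem.Chars.lower letter.toList :=
      pv_sep_not_mem_lower _ (by simpa [pvDomStr] using hlet)
    have hW : ∀ record ∈ records,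
        Char.ofNat 0 ∉ PySem.Chars.lower ((PySem.Dict.mk record).getD "palabra" "").toList := by
      intro record hr
      apply pv_sep_not_mem_lower
      have hrec := List.all_eq_true.mp hrecs record hr
      have hv := pv_getD_dom record "palabra" (by simpa using hrec)
      simpa [pvDomStr] using hv
    by_cases h1 : search_mode = "starts_with"
    · subst h1
      have a2 : (("starts_with" : String) == "ends_with") = false := by decide
      have a3 : (("starts_with" : String) == "exact") = false := by decide
      have a4 : (("starts_with" : String) == "contains") = false := by decide
      simp only [a2, a3, a4, beq_self_eq_true, if_true,
        Bool.true_and, Bool.false_and, Bool.false_eq_true, if_false]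
      apply PySem.List.foldl_congr_mem
      intro acc record hrec
      simp only [PySem.Str.startswith_eq, PySem.Str.toList_lower,
        pv_prefix_frame (Char.ofNat 0) _ _ hN (hW record hrec)]
    · by_cases h2 : search_mode = "ends_with"
      · subst h2
        have a1 : (("ends_with" : String) == "starts_with") = false := by decide
        have a3 : (("ends_with" : String) == "exact") = false := by decide
        have a4 : (("ends_with" : String) == "contains") = false := by decide
        simp only [a1, a3, a4, beq_self_eq_true, if_true,
          Bool.true_and, Bool.false_and, Bool.false_eq_true, if_false]
        apply PySem.List.foldl_congr_mem
        intro acc record hrec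
        simp only [PySem.Str.endswith_eq, PySem.Str.toList_lower,
          pv_suffix_frame (Char.ofNat 0) _ _ hN (hW record hrec)]
      · by_cases h3 : search_mode = "exact"
        · subst h3
          have a1 : (("exact" : String) == "starts_with") = false := by decide
          have a2 : (("exact" : String) == "ends_with") = false := by decide
          have a4 : (("exact" : String) == "contains") = false := by decide
          simp only [a1, a2, a4, beq_self_eq_true, if_true,
            Bool.true_and, Bool.false_and, Bool.false_eq_true, if_false]
          apply PySem.List.foldl_congr_mem
          intro acc record hrec
          have he : (PySem.Str.lower ((PySem.Dict.mk record).getD "palabra" "") == PySem.Str.lower letter)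
              = (PySem.Chars.lower letter.toList ==
                 PySem.Chars.lower ((PySem.Dict.mk record).getD "palabra" "").toList) := by
            rw [Bool.eq_iff_iff, beq_iff_eq, beq_iff_eq, ← String.toList_inj]
            simp only [PySem.Str.toList_lower]
            exact eq_comm
          simp only [he, pv_exact_frame (Char.ofNat 0) _ _ hN (hW record hrec)]
        · by_cases h4 : search_mode = "contains"
          · subst h4
            have a1 : (("contains" : String) == "starts_with") = false := by decide
            have a2 : (("contains" : String) == "ends_with") = false := by decide
            have a3 : (("contains" : String) == "exact") = false := by decide
            simp only [a1, a2, a3, beq_self_eq_true, if_true,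
              Bool.true_and, Bool.false_and, Bool.false_eq_true, if_false]
            apply PySem.List.foldl_congr_mem
            intro acc record hrec
            simp only [PySem.Str.isIn_eq, PySem.Str.toList_lower,
              pv_contains_frame (Char.ofNat 0) _ _ hN (hW record hrec)]
          · have f1 := beq_eq_false_iff_ne.mpr h1
            have f2 := beq_eq_false_iff_ne.mpr h2
            have f3 := beq_eq_false_iff_ne.mpr h3
            have f4 := beq_eq_false_iff_ne.mpr h4
            simp only [f1, f2, f3, f4, Bool.false_eq_true, if_false, Bool.false_and]
            exact pv_foldl_id records []
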